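-- pv_equiv track=rewrite | github.com/wassimea/hs_detection_cnn | detection/common_functions.py | refine_bounding_box
-- ===== SOURCE A (Python) =====
-- def refine_bounding_box(xmin,ymin,xmax,ymax):
--     if(xmin < 0):
--         xmin = 0
--     if(ymin < 0):
--         ymin = 0
--     if(xmax > 640):
--         xmax = 640
--     if(ymax > 480):
--         ymax = 480
--     width = xmax - xmin
--     height = ymax - ymin
--     while (height != width):
--         if(width > height):
--             ymax = ymax + 1
--             height = ymax - ymin
--         elif(height > width):
--             xmax = xmax + 1
--             width = xmax - xmin
--     return xmin,ymin,xmax,ymax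
-- ===== SOURCE B (Python) =====
-- def refine_bounding_box(xmin, ymin, xmax, ymax):
--     xmin = max(xmin, 0)
--     ymin = max(ymin, 0)
--     xmax = min(xmax, 640)
--     ymax = min(ymax, 480)
--     d = (xmax - xmin) - (ymax - ymin)
--     if d > 0:
--         ymax += d
--     else:
--         xmax -= d
--     return xmin, ymin, xmax, ymax
-- ===== Notes on version B (the rewrite author's own statement) =====
-- stated objective: faster
-- what changed: Replaced A's unit-increment while-loop that grows the shorter side one pixel at a time until width == height by a closed-form clamp plus a single addition of the width/height difference.
import Mathlib
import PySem

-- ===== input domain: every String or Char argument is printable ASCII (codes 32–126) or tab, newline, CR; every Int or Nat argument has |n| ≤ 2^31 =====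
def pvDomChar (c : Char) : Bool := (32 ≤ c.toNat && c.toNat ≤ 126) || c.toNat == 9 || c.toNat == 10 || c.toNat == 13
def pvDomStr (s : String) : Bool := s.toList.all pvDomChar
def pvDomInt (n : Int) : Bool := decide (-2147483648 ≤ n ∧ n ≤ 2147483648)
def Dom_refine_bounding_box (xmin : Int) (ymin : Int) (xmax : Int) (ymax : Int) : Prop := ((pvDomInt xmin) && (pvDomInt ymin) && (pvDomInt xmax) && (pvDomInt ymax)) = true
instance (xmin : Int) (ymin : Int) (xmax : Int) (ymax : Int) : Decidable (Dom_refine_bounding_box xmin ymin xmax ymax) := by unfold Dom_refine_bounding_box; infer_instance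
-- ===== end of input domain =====

-- B replaces A's O(|width-height|) one-pixel-at-a-time squaring loop by a single O(1) addition of the difference.

-- ===== PORT A =====
-- while (height != width): grow the smaller dimension by one, recomputing width/height each
-- pass; the fuel argument only bounds the iteration count (|height-width| steps always suffice)
def refineLoopA : Nat → Int → Int → Int → Int → Int × Int × Int × Int
  | 0, xmin, ymin, xmax, ymax => (xmin, ymin, xmax, ymax)
  | n + 1, xmin, ymin, xmax, ymax =>
    let width := xmax - xmin
    let height := ymax - ymin
    if height ≠ width then
      if width > height then refineLoopA n xmin ymin xmax (ymax + 1)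
      else refineLoopA n xmin ymin (xmax + 1) ymax
    else (xmin, ymin, xmax, ymax)

def refine_bounding_box (xmin : Int) (ymin : Int) (xmax : Int) (ymax : Int) : Int × Int × Int × Int :=
  let xmin := if xmin < 0 then 0 else xmin
  let ymin := if ymin < 0 then 0 else ymin
  let xmax := if xmax > 640 then 640 else xmax
  let ymax := if ymax > 480 then 480 else ymax
  refineLoopA ((ymax - ymin) - (xmax - xmin)).natAbs xmin ymin xmax ymax

-- ===== PORT B =====
def refine_bounding_box_alt (xmin : Int) (ymin : Int) (xmax : Int) (ymax : Int) : Int × Int × Int × Int :=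
  let xmin := max xmin 0
  let ymin := max ymin 0
  let xmax := min xmax 640
  let ymax := min ymax 480
  let d := (xmax - xmin) - (ymax - ymin)
  if d > 0 then (xmin, ymin, xmax, ymax + d)
  else (xmin, ymin, xmax - d, ymax)

-- ===== PRECONDITION & SPEC =====
def Spec_refine_bounding_box (xmin : Int) (ymin : Int) (xmax : Int) (ymax : Int) (out : Int × Int × Int × Int) : Prop := out = refine_bounding_box_alt xmin ymin xmax ymax
instance (xmin : Int) (ymin : Int) (xmax : Int) (ymax : Int) (out : Int × Int × Int × Int) : Decidable (Spec_refine_bounding_box xmin ymin xmax ymax out) := by unfold Spec_refine_bounding_box; infer_instance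

-- ===== CLAIM (what is proved, stated in full; the proofs are below) =====
def Claim_equal_refine_bounding_box : Prop := ∀ (xmin : Int) (ymin : Int) (xmax : Int) (ymax : Int), Dom_refine_bounding_box xmin ymin xmax ymax → Spec_refine_bounding_box xmin ymin xmax ymax (refine_bounding_box xmin ymin xmax ymax)

-- ===== LEMMAS AND PROOFS =====

-- the loop's closed form: with fuel ≥ |height-width|, add the difference to the shorter side at once
theorem refineLoopA_closed (n : Nat) (xmin ymin xmax ymax : Int)
    (hn : ((ymax - ymin) - (xmax - xmin)).natAbs ≤ n) :
    refineLoopA n xmin ymin xmax ymax =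
      (if (xmax - xmin) - (ymax - ymin) > 0 then (xmin, ymin, xmax, ymax + ((xmax - xmin) - (ymax - ymin)))
       else (xmin, ymin, xmax - ((xmax - xmin) - (ymax - ymin)), ymax)) := by
  induction n generalizing xmin ymin xmax ymax with
  | zero =>
    rw [refineLoopA]
    rw [if_neg (by omega)]
    congr 3 <;> omega
  | succ n ih =>
    rw [refineLoopA]
    by_cases h : ymax - ymin = xmax - xmin
    · rw [if_neg (by simpa using h)]
      rw [if_neg (by omega)]
      congr 3 <;> omega
    · rw [if_pos (by simpa using h)]
      by_cases hg : xmax - xmin > ymax - ymin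
      · rw [if_pos (by simpa using hg), ih xmin ymin xmax (ymax + 1) (by omega)]
        split <;> split <;> simp_all <;> omega
      · rw [if_neg (by simpa using hg), ih xmin ymin (xmax + 1) ymax (by omega)]
        split <;> split <;> simp_all <;> omega

-- ===== VERDICT (by name: the statement is the Claim_ definition above) =====
theorem refine_bounding_box_spec : Claim_equal_refine_bounding_box := by
  intro xmin ymin xmax ymax _
  unfold Spec_refine_bounding_box refine_bounding_box refine_bounding_box_alt
  have hx : (if xmin < 0 then (0:Int) else xmin) = max xmin 0 := by split <;> omega
  have hy : (if ymin < 0 then (0:Int) else ymin) = max ymin 0 := by split <;> omega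
  have hxm : (if xmax > 640 then (640:Int) else xmax) = min xmax 640 := by split <;> omega
  have hym : (if ymax > 480 then (480:Int) else ymax) = min ymax 480 := by split <;> omega
  rw [hx, hy, hxm, hym, refineLoopA_closed _ _ _ _ _ le_rfl]
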